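-- pv_equiv track=rewrite | github.com/xclaerho/advent-of-code | 2020/day 20/part2.py | sea_roughness
-- ===== SOURCE A (Python) =====
-- def sea_roughness(image, monster_coords) -> int:
--     roughness = 0
--     for y in range(len(image)):
--         for x in range(len(image[0])):
--             if not (y,x) in monster_coords:
--                 if image[y][x] == "#":
--                     roughness += 1
--     return roughness
-- ===== SOURCE B (Python) =====
-- def sea_roughness(image, monster_coords) -> int:
--     width = len(image[0]) if image else 0
--     total = sum(row[:width].count('#') for row in image)
--     overlap = sum(1 for (y, x) in set(monster_coords)
--                   if 0 <= y < len(image) and 0 <= x < width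
--                   and x < len(image[y]) and image[y][x] == '#')
--     return total - overlap
-- ===== Notes on version B (the rewrite author's own statement) =====
-- stated objective: faster
-- what changed: Replaces the per-pixel double loop with a linear membership test by one row-level count of '#' pixels (rows read to the first row's width, as A does) minus a single pass over the distinct monster coordinates that hit a '#'.
-- crash fix: On images where some row is shorter than the first row and an uncovered cell of it falls inside the first row's width, A raises IndexError; B never reads those cells and returns the roughness count. — e.g. on sea_roughness(["#.", ""], []): A raises IndexError, B returns 1
import Mathlib
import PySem

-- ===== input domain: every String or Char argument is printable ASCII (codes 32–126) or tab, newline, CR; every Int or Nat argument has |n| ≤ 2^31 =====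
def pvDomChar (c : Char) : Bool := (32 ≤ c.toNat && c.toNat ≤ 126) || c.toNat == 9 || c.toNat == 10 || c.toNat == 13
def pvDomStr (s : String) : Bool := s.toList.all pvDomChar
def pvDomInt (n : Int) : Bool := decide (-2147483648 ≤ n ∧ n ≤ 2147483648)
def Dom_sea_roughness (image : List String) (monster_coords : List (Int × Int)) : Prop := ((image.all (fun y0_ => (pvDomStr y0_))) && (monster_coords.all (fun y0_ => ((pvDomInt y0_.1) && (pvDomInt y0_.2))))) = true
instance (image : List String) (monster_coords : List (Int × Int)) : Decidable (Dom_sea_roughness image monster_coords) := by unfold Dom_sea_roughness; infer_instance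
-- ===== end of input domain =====

-- B replaces A's per-pixel double loop with a membership test by a flat count of '#' pixels (rows truncated to the first row's width, as A reads them) minus one pass over the distinct monster coordinates that hit a '#'.

-- ===== PORT A =====
-- per-pixel double loop: for y in range(len(image)): for x in range(len(image[0])): …
def sea_roughness (image : List String) (monster_coords : List (Int × Int)) : Int :=
  (PySem.List.pyRange 0 image.length 1).foldl (fun acc y =>
    (PySem.List.pyRange 0 (PySem.List.pyGetD image 0 "").length 1).foldl (fun acc2 x =>
      if ¬ ((y, x) ∈ monster_coords) then
        if PySem.List.pyGetD (PySem.List.pyGetD image y "").toList x ' ' = '#' then acc2 + 1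
        else acc2
      else acc2) acc) 0

-- ===== PORT B =====
def sea_roughness_alt (image : List String) (monster_coords : List (Int × Int)) : Int :=
  let width : Nat := match image with
    | [] => 0
    | _ => (PySem.List.pyGetD image 0 "").length
  let total : Int := (image.map (fun row =>
    (PySem.Chars.count (PySem.List.slice row.toList none (some (width : Int))) "#".toList : Int))).sum
  let monsters : PySem.Set (Int × Int) := PySem.Set.ofList monster_coords
  let overlap : Int := monsters.foldl (fun acc p =>
    if 0 ≤ p.1 ∧ p.1 < (image.length : Int) ∧ 0 ≤ p.2 ∧ p.2 < (width : Int) ∧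
       p.2 < ((PySem.List.pyGetD image p.1 "").length : Int) ∧
       PySem.List.pyGetD (PySem.List.pyGetD image p.1 "").toList p.2 ' ' = '#'
    then acc + 1 else acc) 0
  total - overlap

-- ===== PRECONDITION & SPEC =====
-- Pre_ is exactly A's return domain: every grid cell (y, x) with x inside the first row's
-- width must either carry a monster coordinate or lie inside row y, otherwise A's
-- image[y][x] raises IndexError.
def Pre_sea_roughness (image : List String) (monster_coords : List (Int × Int)) : Prop :=
  ∀ y ∈ PySem.List.pyRange 0 image.length 1,
    ∀ x ∈ PySem.List.pyRange 0 (PySem.List.pyGetD image 0 "").length 1,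
      (y, x) ∈ monster_coords ∨ x < ((PySem.List.pyGetD image y "").length : Int)
instance (image : List String) (monster_coords : List (Int × Int)) : Decidable (Pre_sea_roughness image monster_coords) := by unfold Pre_sea_roughness; infer_instance
def pvWitness_sea_roughness : List String × (List (Int × Int)) := (["#.#", ".#."], [(0, 0), (1, 1), (7, -2)])

-- On inputs violating Pre_ the Python A raises IndexError (an uncovered cell beyond a short row); B simply never reads those cells and returns the count.
def Raises_sea_roughness (image : List String) (monster_coords : List (Int × Int)) : Prop :=
  ¬ Pre_sea_roughness image monster_coords
instance (image : List String) (monster_coords : List (Int × Int)) : Decidable (Raises_sea_roughness image monster_coords) := by unfold Raises_sea_roughness; infer_instance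
def pvRaiseWitness_sea_roughness : List String × (List (Int × Int)) := (["#.", ""], [])
def pvRaiseWitnessOut_sea_roughness : Int := 1

def Spec_sea_roughness (image : List String) (monster_coords : List (Int × Int)) (out : Int) : Prop := out = sea_roughness_alt image monster_coords
instance (image : List String) (monster_coords : List (Int × Int)) (out : Int) : Decidable (Spec_sea_roughness image monster_coords out) := by unfold Spec_sea_roughness; infer_instance

-- ===== CLAIM (what is proved, stated in full; the proofs are below) =====
def Claim_equal_sea_roughness : Prop := ∀ (image : List String) (monster_coords : List (Int × Int)), Dom_sea_roughness image monster_coords → Pre_sea_roughness image monster_coords → Spec_sea_roughness image monster_coords (sea_roughness image monster_coords)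
def Claim_raises_sea_roughness : Prop := (∀ (image : List String) (monster_coords : List (Int × Int)), Dom_sea_roughness image monster_coords → Raises_sea_roughness image monster_coords → ¬ Pre_sea_roughness image monster_coords) ∧ (Dom_sea_roughness (pvRaiseWitness_sea_roughness.1) (pvRaiseWitness_sea_roughness.2) ∧ Raises_sea_roughness (pvRaiseWitness_sea_roughness.1) (pvRaiseWitness_sea_roughness.2) ∧ sea_roughness_alt (pvRaiseWitness_sea_roughness.1) (pvRaiseWitness_sea_roughness.2) = pvRaiseWitnessOut_sea_roughness)

-- ===== LEMMAS AND PROOFS =====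

-- Python's str.count with a single-character needle is List.count
theorem count_go_single (c : Char) (l : List Char) (fuel acc : Nat) (h : l.length ≤ fuel) :
    PySem.Chars.count.go [c] fuel l acc = acc + l.count c := by
  induction l generalizing fuel acc with
  | nil => cases fuel <;> simp [PySem.Chars.count.go]
  | cons hd tl ih =>
    cases fuel with
    | zero => simp at h
    | succ f =>
      simp only [PySem.Chars.count.go]
      by_cases hc : hd = c
      · subst hc
        have := ih f (acc + 1) (by simpa using h)
        simp [List.isPrefixOf, this]
        omega
      · have hpre : [c].isPrefixOf (hd :: tl) = false := by
          simp [List.isPrefixOf]; exact fun hh => (hc hh.symm).elim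
        simp [hpre, hc, ih f acc (by simpa using h)]

theorem str_count_single (s : List Char) (c : Char) :
    PySem.Chars.count s [c] = s.count c := by
  simp [PySem.Chars.count, count_go_single c s s.length 0 le_rfl]

-- a count splits over a conjunction with a predicate and its negation
theorem countP_split {α : Type} (l : List α) (p q : α → Bool) :
    l.countP (fun a => !p a && q a) + l.countP (fun a => p a && q a) = l.countP q := by
  induction l with
  | nil => simp
  | cons hd tl ih =>
    simp only [List.countP_cons]
    cases hp : p hd <;> cases hq : q hd <;> simp <;> omega

theorem sum_map_sub_int {α : Type} (l : List α) (f g : α → Int) :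
    (l.map (fun a => f a - g a)).sum = (l.map f).sum - (l.map g).sum := by
  induction l with
  | nil => simp
  | cons hd tl ih => simp [ih]; ring

-- a defaulted read can only produce '#' inside the row
theorem pyGetD_hash_lt (cs : List Char) (x : Int)
    (h : PySem.List.pyGetD cs x ' ' = '#') : x < (cs.length : Int) := by
  by_contra hge
  have hnone : PySem.List.pyGet? cs x = none := by
    rw [PySem.List.pyGet?_eq_none_iff]
    intro hin
    exact hge hin.2
  rw [PySem.List.pyGetD_of_none cs x ' ' hnone] at h
  exact absurd h (by decide)

-- counting '#' by index over the first w positions equals counting in the truncated row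
theorem count_row_take (cs : List Char) (w : Nat) :
    ((PySem.List.pyRange 0 (w : Int) 1).countP (fun x =>
      decide (PySem.List.pyGetD cs x ' ' = '#'))) = (cs.take w).count '#' := by
  induction w with
  | zero => simp
  | succ k ih =>
    have hsplit : PySem.List.pyRange 0 ((k : Int) + 1) 1
        = PySem.List.pyRange 0 (k : Int) 1 ++ [(k : Int)] :=
      PySem.List.pyRange_one_succ_right (by positivity)
    have hcast : ((k + 1 : Nat) : Int) = (k : Int) + 1 := by push_cast; ring
    rw [hcast, hsplit, List.countP_append, ih, List.take_add_one, List.count_append]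
    congr 1
    by_cases hk : k < cs.length
    · have hd : PySem.List.pyGetD cs (k : Int) ' ' = cs[k] := by
        rw [PySem.List.pyGetD_eq_getElem cs ' ' (by positivity) (by exact_mod_cast hk)]
        simp
      rw [cs.getElem?_eq_getElem hk]
      by_cases hh : cs[k] = '#' <;> simp [hd, hh]
    · have hnone : PySem.List.pyGet? cs (k : Int) = none := by
        rw [PySem.List.pyGet?_eq_none_iff]
        intro hin
        exact hk (by exact_mod_cast hin.2)
      have hd := PySem.List.pyGetD_of_none cs (k : Int) ' ' hnone
      simp [hd, List.getElem?_eq_none (le_of_not_gt hk)]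

-- A as a sum over y of per-row counts
theorem A_norm (image : List String) (mcs : List (Int × Int)) :
    sea_roughness image mcs =
      ((PySem.List.pyRange 0 image.length 1).map (fun y =>
        ((PySem.List.pyRange 0 (PySem.List.pyGetD image 0 "").length 1).countP (fun x =>
          decide ((y, x) ∉ mcs ∧ PySem.List.pyGetD (PySem.List.pyGetD image y "").toList x ' ' = '#')) : Int))).sum := by
  unfold sea_roughness
  have hin : ∀ (y acc : Int),
      (PySem.List.pyRange 0 (PySem.List.pyGetD image 0 "").length 1).foldl (fun acc2 x =>
        if ¬ ((y, x) ∈ mcs) then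
          if PySem.List.pyGetD (PySem.List.pyGetD image y "").toList x ' ' = '#' then acc2 + 1
          else acc2
        else acc2) acc
      = acc + ((PySem.List.pyRange 0 (PySem.List.pyGetD image 0 "").length 1).countP (fun x =>
          decide ((y, x) ∉ mcs ∧ PySem.List.pyGetD (PySem.List.pyGetD image y "").toList x ' ' = '#')) : Int) := by
    intro y acc
    have h1 := PySem.List.foldl_congr_mem
      (l := PySem.List.pyRange 0 (PySem.List.pyGetD image 0 "").length 1) (init := acc)
      (f := fun acc2 x => if ¬ ((y, x) ∈ mcs) then
          (if PySem.List.pyGetD (PySem.List.pyGetD image y "").toList x ' ' = '#' then acc2 + 1 else acc2)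
        else acc2)
      (g := fun acc2 x => if ((y, x) ∉ mcs ∧ PySem.List.pyGetD (PySem.List.pyGetD image y "").toList x ' ' = '#') then acc2 + 1 else acc2)
      (by
        intro a x _
        by_cases hm : (y, x) ∈ mcs <;> by_cases hc : PySem.List.pyGetD (PySem.List.pyGetD image y "").toList x ' ' = '#' <;>
          simp [hm, hc])
    rw [h1]
    exact PySem.List.foldl_ite_add_one _ _ acc
  have h2 := PySem.List.foldl_congr_mem
    (l := PySem.List.pyRange 0 image.length 1) (init := (0 : Int))
    (f := fun acc y => (PySem.List.pyRange 0 (PySem.List.pyGetD image 0 "").length 1).foldl (fun acc2 x =>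
      if ¬ ((y, x) ∈ mcs) then
        (if PySem.List.pyGetD (PySem.List.pyGetD image y "").toList x ' ' = '#' then acc2 + 1 else acc2)
      else acc2) acc)
    (g := fun acc y => acc + ((PySem.List.pyRange 0 (PySem.List.pyGetD image 0 "").length 1).countP (fun x =>
      decide ((y, x) ∉ mcs ∧ PySem.List.pyGetD (PySem.List.pyGetD image y "").toList x ' ' = '#')) : Int))
    (by intro acc y _; exact hin y acc)
  rw [h2]
  rw [PySem.List.foldl_add]
  simp

-- B as truncated total minus distinct-monster overlap
theorem B_norm (image : List String) (mcs : List (Int × Int)) :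
    sea_roughness_alt image mcs =
      ((image.map (fun row =>
        ((row.toList.take (PySem.List.pyGetD image 0 "").length).count '#' : Int))).sum)
      - (((PySem.Set.ofList mcs : List (Int × Int)).countP (fun p =>
          decide (0 ≤ p.1 ∧ p.1 < (image.length : Int) ∧ 0 ≤ p.2 ∧
            p.2 < ((PySem.List.pyGetD image 0 "").length : Int) ∧
            p.2 < ((PySem.List.pyGetD image p.1 "").length : Int) ∧
            PySem.List.pyGetD (PySem.List.pyGetD image p.1 "").toList p.2 ' ' = '#'))) : Int) := by
  unfold sea_roughness_alt
  have hwidth : (match image with | [] => 0 | _ => (PySem.List.pyGetD image 0 "").length)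
      = (PySem.List.pyGetD image 0 "").length := by
    cases image <;> rfl
  simp only [hwidth]
  have hov := PySem.List.foldl_ite_add_one
    (fun p : Int × Int => 0 ≤ p.1 ∧ p.1 < (image.length : Int) ∧ 0 ≤ p.2 ∧
      p.2 < ((PySem.List.pyGetD image 0 "").length : Int) ∧
      p.2 < ((PySem.List.pyGetD image p.1 "").length : Int) ∧
      PySem.List.pyGetD (PySem.List.pyGetD image p.1 "").toList p.2 ' ' = '#')
    (PySem.Set.ofList mcs : List (Int × Int)) 0
  simp only [hov, zero_add]
  congr 1
  apply congrArg
  apply List.map_congr_left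
  intro row _
  have hsl : PySem.List.slice row.toList none (some ((PySem.List.pyGetD image 0 "").length : Int))
      = row.toList.take (PySem.List.pyGetD image 0 "").length := by
    rw [PySem.List.slice_to _ (by positivity)]
    simp
  have hone : "#".toList = ['#'] := by decide
  rw [hsl, hone, str_count_single]

-- sum over rows of per-row predicate counts = count over the product grid
theorem sum_count_grid (n w : Nat) (pred : Int × Int → Prop) [DecidablePred pred] :
    ((PySem.List.pyRange 0 (n : Int) 1).map (fun y =>
      (PySem.List.pyRange 0 (w : Int) 1).countP (fun x => decide (pred (y, x))))).sum
    = ((PySem.List.pyRange 0 (n : Int) 1).flatMap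
        (fun y => (PySem.List.pyRange 0 (w : Int) 1).map (Prod.mk y))).countP
        (fun p => decide (pred p)) := by
  rw [List.countP_flatMap]
  congr 1
  apply List.map_congr_left
  intro y _
  simp [List.countP_map]
  rfl

-- the monster cells of the grid are exactly the in-bounds distinct monster coordinates
theorem grid_eq_set (image : List String) (mcs : List (Int × Int)) :
    ((PySem.List.pyRange 0 (image.length : Int) 1).flatMap
        (fun y => (PySem.List.pyRange 0 ((PySem.List.pyGetD image 0 "").length : Int) 1).map (Prod.mk y))).countP
        (fun p => decide (p ∈ mcs ∧ PySem.List.pyGetD (PySem.List.pyGetD image p.1 "").toList p.2 ' ' = '#'))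
    = (PySem.Set.ofList mcs : List (Int × Int)).countP (fun p =>
        decide (0 ≤ p.1 ∧ p.1 < (image.length : Int) ∧ 0 ≤ p.2 ∧
          p.2 < ((PySem.List.pyGetD image 0 "").length : Int) ∧
          p.2 < ((PySem.List.pyGetD image p.1 "").length : Int) ∧
          PySem.List.pyGetD (PySem.List.pyGetD image p.1 "").toList p.2 ' ' = '#')) := by
  rw [List.countP_eq_length_filter, List.countP_eq_length_filter]
  apply List.Perm.length_eq
  have hG : ((PySem.List.pyRange 0 (image.length : Int) 1).flatMap
      (fun y => (PySem.List.pyRange 0 ((PySem.List.pyGetD image 0 "").length : Int) 1).map (Prod.mk y))).Nodup :=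
    List.Nodup.product (PySem.List.nodup_pyRange_one _ _) (PySem.List.nodup_pyRange_one _ _)
  apply (List.perm_ext_iff_of_nodup
    (List.Nodup.filter _ hG)
    (List.Nodup.filter _ (PySem.Set.nodup_ofList _))).2
  rintro ⟨y, x⟩
  simp only [List.mem_filter, List.mem_flatMap, List.mem_map, Prod.mk.injEq,
    PySem.List.mem_pyRange_one, PySem.Set.mem_ofList, decide_eq_true_eq]
  constructor
  · rintro ⟨⟨a, ⟨ha0, han⟩, b, ⟨⟨hb0, hbw⟩, hay, hbx⟩⟩, hmem, hch⟩
    subst hay; subst hbx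
    exact ⟨hmem, ha0, han, hb0, hbw,
      by simpa using pyGetD_hash_lt (PySem.List.pyGetD image a "").toList b hch, hch⟩
  · rintro ⟨hmem, hy0, hyn, hx0, hxw, _, hch⟩
    exact ⟨⟨y, ⟨hy0, hyn⟩, x, ⟨⟨hx0, hxw⟩, rfl, rfl⟩⟩, hmem, hch⟩

-- ===== VERDICT (by name: the statement is the Claim_ definition above) =====
theorem sea_roughness_spec : Claim_equal_sea_roughness := by
  intro image mcs _hdom _hpre
  unfold Spec_sea_roughness
  rw [A_norm, B_norm]
  have hsplit : ∀ y : Int,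
      (((PySem.List.pyRange 0 ((PySem.List.pyGetD image 0 "").length : Int) 1).countP (fun x =>
        decide ((y, x) ∉ mcs ∧ PySem.List.pyGetD (PySem.List.pyGetD image y "").toList x ' ' = '#'))) : Int)
      = (((PySem.List.pyRange 0 ((PySem.List.pyGetD image 0 "").length : Int) 1).countP (fun x =>
        decide (PySem.List.pyGetD (PySem.List.pyGetD image y "").toList x ' ' = '#'))) : Int)
      - (((PySem.List.pyRange 0 ((PySem.List.pyGetD image 0 "").length : Int) 1).countP (fun x =>
        decide ((y, x) ∈ mcs ∧ PySem.List.pyGetD (PySem.List.pyGetD image y "").toList x ' ' = '#'))) : Int) := by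
    intro y
    have h := countP_split (PySem.List.pyRange 0 ((PySem.List.pyGetD image 0 "").length : Int) 1)
      (fun x => decide ((y, x) ∈ mcs))
      (fun x => decide (PySem.List.pyGetD (PySem.List.pyGetD image y "").toList x ' ' = '#'))
    have e1 : (PySem.List.pyRange 0 ((PySem.List.pyGetD image 0 "").length : Int) 1).countP (fun x =>
        decide ((y, x) ∉ mcs ∧ PySem.List.pyGetD (PySem.List.pyGetD image y "").toList x ' ' = '#'))
        = (PySem.List.pyRange 0 ((PySem.List.pyGetD image 0 "").length : Int) 1).countP (fun x =>
        !decide ((y, x) ∈ mcs) && decide (PySem.List.pyGetD (PySem.List.pyGetD image y "").toList x ' ' = '#')) := by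
      congr 1
      funext x
      simp
    have e2 : (PySem.List.pyRange 0 ((PySem.List.pyGetD image 0 "").length : Int) 1).countP (fun x =>
        decide ((y, x) ∈ mcs ∧ PySem.List.pyGetD (PySem.List.pyGetD image y "").toList x ' ' = '#'))
        = (PySem.List.pyRange 0 ((PySem.List.pyGetD image 0 "").length : Int) 1).countP (fun x =>
        decide ((y, x) ∈ mcs) && decide (PySem.List.pyGetD (PySem.List.pyGetD image y "").toList x ' ' = '#')) := by
      congr 1
      funext x
      simp
    rw [e1, e2]
    omega
  rw [List.map_congr_left (fun y _ => hsplit y), sum_map_sub_int]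
  congr 1
  · -- totals agree
    set w := (PySem.List.pyGetD image 0 "").length with hwdef
    conv_rhs => rw [← PySem.List.map_pyGetD_pyRange_zero' image "", List.map_map]
    apply congrArg
    apply List.map_congr_left
    intro y _
    simp only [Function.comp]
    rw [← count_row_take (PySem.List.pyGetD image y "").toList w]
  · -- overlaps agree
    have hcast : ((PySem.List.pyRange 0 (image.length : Int) 1).map (fun y =>
        (((PySem.List.pyRange 0 ((PySem.List.pyGetD image 0 "").length : Int) 1).countP (fun x =>
          decide ((y, x) ∈ mcs ∧ PySem.List.pyGetD (PySem.List.pyGetD image y "").toList x ' ' = '#'))) : Int))).sum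
        = (((PySem.List.pyRange 0 (image.length : Int) 1).map (fun y =>
        (PySem.List.pyRange 0 ((PySem.List.pyGetD image 0 "").length : Int) 1).countP (fun x =>
          decide ((y, x) ∈ mcs ∧ PySem.List.pyGetD (PySem.List.pyGetD image y "").toList x ' ' = '#')))).sum : Int) := by
      rw [Nat.cast_list_sum, List.map_map]
      rfl
    rw [hcast]
    have hgrid := sum_count_grid image.length (PySem.List.pyGetD image 0 "").length
      (fun p : Int × Int => p ∈ mcs ∧ PySem.List.pyGetD (PySem.List.pyGetD image p.1 "").toList p.2 ' ' = '#')
    rw [hgrid, grid_eq_set image mcs]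

theorem sea_roughness_raises : Claim_raises_sea_roughness := by
  unfold Claim_raises_sea_roughness
  exact ⟨fun _ _ _ h => h, by decide⟩

-- witness self-check: the raise witness does lie inside Raises_ (projection of the verdict above)
theorem pvRaiseWitness_ok : Raises_sea_roughness pvRaiseWitness_sea_roughness.1 pvRaiseWitness_sea_roughness.2 :=
  sea_roughness_raises.2.2.1
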